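-- pv_equiv track=rewrite | github.com/Fouadamin123/mdical-combrestion | mdical/compress/compact.py | delta_decode
-- ===== SOURCE A (Python) =====
-- def delta_decode(encoded_stream):
--     pixels = []
--     for tag, val in encoded_stream:
--         if tag == 'first':
--             pixels.append(val)
--             prev = val
--         else:
--             delta = val
--             current = prev + delta
--             pixels.append(current)
--             prev = current
--     return pixels
-- ===== SOURCE B (Python) =====
-- def delta_decode(encoded_stream):
--     # Phase 1: split the stream into segments, each beginning at a 'first' tag.
--     segments = []
--     for tag, val in encoded_stream:
--         if tag == 'first':
--             segments.append([val])
--         else: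
--             segments[-1].append(val)
--     # Phase 2: each segment's pixel values are the prefix sums of its entries.
--     out = []
--     for seg in segments:
--         acc = 0
--         for v in seg:
--             acc += v
--             out.append(acc)
--     return out
-- ===== Notes on version B (the rewrite author's own statement) =====
-- stated objective: alternative
-- what changed: B decodes in two phases - it first splits the stream into segments starting at each 'first' tag, then emits each segment's prefix sums - instead of one loop threading a mutable prev variable.
import Mathlib
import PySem

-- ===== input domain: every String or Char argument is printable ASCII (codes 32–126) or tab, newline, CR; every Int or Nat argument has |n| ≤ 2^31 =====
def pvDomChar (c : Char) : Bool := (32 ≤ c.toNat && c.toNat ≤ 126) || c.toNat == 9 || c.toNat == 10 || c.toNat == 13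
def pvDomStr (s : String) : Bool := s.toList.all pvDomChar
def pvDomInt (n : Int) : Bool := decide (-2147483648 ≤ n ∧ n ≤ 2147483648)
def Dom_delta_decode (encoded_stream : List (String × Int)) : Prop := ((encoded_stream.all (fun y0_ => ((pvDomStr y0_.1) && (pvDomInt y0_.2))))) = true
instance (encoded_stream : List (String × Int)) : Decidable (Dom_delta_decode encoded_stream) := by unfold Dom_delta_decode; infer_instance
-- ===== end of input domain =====

-- B decodes in two phases — split the stream into segments at each 'first' tag, then emit each
-- segment's prefix sums — instead of A's single loop threading a mutable prev variable.

-- ===== PORT A =====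
-- prev is modelled as Option Int; 'none' is Python's unbound prev (UnboundLocalError, excluded by Pre_;
-- the .getD 0 fallback is only ever reached outside Pre_).
def pvStepA (st : List Int × Option Int) (tv : String × Int) : List Int × Option Int :=
  if tv.1 = "first" then (st.1 ++ [tv.2], some tv.2)
  else
    let current := st.2.getD 0 + tv.2
    (st.1 ++ [current], some current)

def delta_decode (encoded_stream : List (String × Int)) : List Int :=
  (encoded_stream.foldl pvStepA ([], none)).1

-- ===== PORT B =====
-- phase 1 step: start a new segment at a 'first' tag, otherwise append to the last segment
-- (segments[-1].append(val); segments[-1] on empty segments is Python's IndexError, excluded by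
-- Pre_; the getLastD [] fallback is only ever reached outside Pre_).
def pvSegStep (segs : List (List Int)) (tv : String × Int) : List (List Int) :=
  if tv.1 = "first" then segs ++ [[tv.2]]
  else segs.dropLast ++ [segs.getLastD [] ++ [tv.2]]

-- phase 2 inner loop: acc += v; out.append(acc)
def pvPSStep (p : List Int × Int) (v : Int) : List Int × Int :=
  (p.1 ++ [p.2 + v], p.2 + v)

def delta_decode_alt (encoded_stream : List (String × Int)) : List Int :=
  let segments := encoded_stream.foldl pvSegStep []
  segments.foldl (fun out seg => (seg.foldl pvPSStep (out, 0)).1) []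

-- ===== PRECONDITION & SPEC =====
-- Pre_ excludes exactly the streams whose first element is not tagged 'first': there Python A
-- raises UnboundLocalError (prev is unbound).
def Pre_delta_decode (encoded_stream : List (String × Int)) : Prop :=
  encoded_stream = [] ∨ encoded_stream.head?.map Prod.fst = some "first"

instance (encoded_stream : List (String × Int)) : Decidable (Pre_delta_decode encoded_stream) := by
  unfold Pre_delta_decode; infer_instance

def pvWitness_delta_decode : (List (String × Int)) := [("first", 7), ("d", -2), ("first", 3), ("d", 4)]

def Spec_delta_decode (encoded_stream : List (String × Int)) (out : List Int) : Prop := out = delta_decode_alt encoded_stream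
instance (encoded_stream : List (String × Int)) (out : List Int) : Decidable (Spec_delta_decode encoded_stream out) := by unfold Spec_delta_decode; infer_instance

-- ===== CLAIM (what is proved, stated in full; the proofs are below) =====
def Claim_equal_delta_decode : Prop := ∀ (encoded_stream : List (String × Int)), Dom_delta_decode encoded_stream → Pre_delta_decode encoded_stream → Spec_delta_decode encoded_stream (delta_decode encoded_stream)

-- ===== LEMMAS AND PROOFS =====

-- reference decoder: c = val if tag='first' else prev+val, threaded functionally
def pvF (prev : Option Int) : List (String × Int) → List Int
  | [] => []
  | tv :: r =>
    let c := if tv.1 = "first" then tv.2 else prev.getD 0 + tv.2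
    c :: pvF (some c) r

-- prefix sums of a segment starting from accumulator a
def pvPsum (a : Int) : List Int → List Int
  | [] => []
  | v :: r => (a + v) :: pvPsum (a + v) r

-- the segments phase-1 produces once at least one segment exists
def pvSegsFrom (s : List Int) : List (String × Int) → List (List Int)
  | [] => [s]
  | tv :: r => if tv.1 = "first" then s :: pvSegsFrom [tv.2] r else pvSegsFrom (s ++ [tv.2]) r

def pvDecode : List (List Int) → List Int
  | [] => []
  | s :: r => pvPsum 0 s ++ pvDecode r

theorem pvFoldA (es : List (String × Int)) : ∀ (pix : List Int) (prev : Option Int),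
    (es.foldl pvStepA (pix, prev)).1 = pix ++ pvF prev es := by
  induction es with
  | nil => intro pix prev; simp [pvF]
  | cons tv r ih =>
    intro pix prev
    by_cases h : tv.1 = "first" <;>
      simp [pvStepA, h, pvF, ih]

theorem pvFoldPS (seg : List Int) : ∀ (out : List Int) (a : Int),
    (seg.foldl pvPSStep (out, a)).1 = out ++ pvPsum a seg := by
  induction seg with
  | nil => intro out a; simp [pvPsum]
  | cons v r ih => intro out a; simp [pvPSStep, pvPsum, ih, List.append_assoc]

theorem pvFoldDec (segs : List (List Int)) : ∀ (out : List Int),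
    (segs.foldl (fun out seg => (seg.foldl pvPSStep (out, 0)).1) out) = out ++ pvDecode segs := by
  induction segs with
  | nil => intro out; simp [pvDecode]
  | cons s r ih =>
    intro out
    simp only [List.foldl_cons]
    rw [pvFoldPS, ih]
    simp [pvDecode]

theorem pvFoldSeg (es : List (String × Int)) : ∀ (segs : List (List Int)) (s : List Int),
    es.foldl pvSegStep (segs ++ [s]) = segs ++ pvSegsFrom s es := by
  induction es with
  | nil => intro segs s; simp [pvSegsFrom]
  | cons tv r ih =>
    intro segs s
    by_cases h : tv.1 = "first"
    · have : pvSegStep (segs ++ [s]) tv = (segs ++ [s]) ++ [[tv.2]] := by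
        simp [pvSegStep, h]
      simp only [List.foldl_cons, this]
      rw [ih (segs ++ [s]) [tv.2]]
      simp [pvSegsFrom, h]
    · have : pvSegStep (segs ++ [s]) tv = segs ++ [s ++ [tv.2]] := by
        simp [pvSegStep, h]
      simp only [List.foldl_cons, this]
      rw [ih segs (s ++ [tv.2])]
      simp [pvSegsFrom, h]

theorem pvPsum_concat (s : List Int) : ∀ (a v : Int),
    pvPsum a (s ++ [v]) = pvPsum a s ++ [a + s.sum + v] := by
  induction s with
  | nil => intro a v; simp [pvPsum]
  | cons w r ih =>
    intro a v
    simp only [List.cons_append, pvPsum, ih, List.sum_cons]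
    ring_nf

theorem pvDecSegsFrom (es : List (String × Int)) : ∀ (s : List Int),
    pvDecode (pvSegsFrom s es) = pvPsum 0 s ++ pvF (some s.sum) es := by
  induction es with
  | nil => intro s; simp [pvSegsFrom, pvDecode, pvF]
  | cons tv r ih =>
    intro s
    by_cases h : tv.1 = "first"
    · simp [pvSegsFrom, h, pvDecode, ih, pvF, pvPsum]
    · simp only [pvSegsFrom, h, ite_false, ih, pvPsum_concat, pvF]
      simp [List.append_assoc]

-- ===== VERDICT (by name: the statement is the Claim_ definition above) =====
theorem delta_decode_spec : Claim_equal_delta_decode := by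
  intro es _ hpre
  unfold Spec_delta_decode
  cases es with
  | nil => simp [delta_decode, delta_decode_alt]
  | cons tv r =>
    have hfirst : tv.1 = "first" := by
      rcases hpre with h | h
      · exact absurd h (by simp)
      · simpa using h
    unfold delta_decode delta_decode_alt
    rw [pvFoldA]
    have h0 : pvSegStep [] tv = [] ++ [[tv.2]] := by simp [pvSegStep, hfirst]
    simp only [List.foldl_cons, h0]
    rw [pvFoldSeg r [] [tv.2]]
    simp only [List.nil_append]
    rw [pvFoldDec, pvDecSegsFrom]
    simp [pvF, hfirst, pvPsum]
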